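-- pv_equiv track=rewrite | github.com/tomerpq/All-Projects-Of-Tomer-Paz | Python Projects/Proj5/hw5_315311365.py | suffix_prefix_overlap_hash1
-- ===== SOURCE A (Python) =====
-- class Dict:
--     def __init__(self, m, hash_func=hash):
--         """ initial hash table, m empty entries """
--         self.table = [ [] for i in range(m)]
--         self.hash_mod = lambda x: hash_func(x) % m
--
--     def __repr__(self):
--         L = [self.table[i] for i in range(len(self.table))]
--         return "".join([str(i) + " " + str(L[i]) + "\n" for i in range(len(self.table))])
--
--     def insert(self, key, value):
--         """ insert key,value into table
--             Allow repetitions of keys """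
--         i = self.hash_mod(key) #hash on key only
--         item = [key, value]    #pack into one item
--         self.table[i].append(item)
--
--     def find(self, key):
--         """ returns ALL values of key as a list, empty list if none """
--         lst = []
--         i = self.hash_mod(key)
--         for lsts in self.table[i]:
--             if lsts[0] == key:
--                 lst.append(lsts[1])
--         return lst
--
-- def suffix_prefix_overlap_hash1(lst, k):
--     newLst = []
--     d = Dict(k)
--     for i in range(len(lst)):
--         d.insert(lst[i][-k:],i)
--     for i in range(len(lst)):
--         indexLst = d.find(lst[i][:k])
--         for place in indexLst:
--             if place != i:
--                 newLst.append((place,i))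
--     return newLst
-- ===== SOURCE B (Python) =====
-- def suffix_prefix_overlap_hash1(lst, k):
--     # plain quadratic scan: compare every k-suffix with every k-prefix directly,
--     # no hash table at all
--     return [(j, i)
--             for i, s in enumerate(lst)
--             for j, t in enumerate(lst)
--             if j != i and t[-k:] == s[:k]]
-- ===== Notes on version B (the rewrite author's own statement) =====
-- stated objective: simpler
-- what changed: B drops A's hand-rolled chained hash table (class Dict, modular bucket choice, per-find bucket scan) entirely and emits the pairs with one direct nested comprehension comparing every k-suffix with every k-prefix.
import Mathlib
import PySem

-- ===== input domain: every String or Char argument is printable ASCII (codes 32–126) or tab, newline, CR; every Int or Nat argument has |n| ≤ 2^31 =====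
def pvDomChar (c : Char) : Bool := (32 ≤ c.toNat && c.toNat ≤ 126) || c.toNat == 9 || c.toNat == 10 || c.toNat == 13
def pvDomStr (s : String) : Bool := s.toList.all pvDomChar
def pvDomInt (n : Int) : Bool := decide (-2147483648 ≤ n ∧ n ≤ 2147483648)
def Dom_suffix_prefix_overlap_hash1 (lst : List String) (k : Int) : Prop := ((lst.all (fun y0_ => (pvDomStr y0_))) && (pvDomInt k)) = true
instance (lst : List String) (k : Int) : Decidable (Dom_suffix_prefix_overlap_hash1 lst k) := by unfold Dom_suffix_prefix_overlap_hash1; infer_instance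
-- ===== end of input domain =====

-- B drops A's hand-rolled chained hash table entirely and compares every k-suffix with
-- every k-prefix by a direct nested scan; same return value on Pre_ (k ≥ 1 or empty list).

-- ===== PORT A =====
-- Python's builtin `hash` only chooses a bucket; `find` filters the bucket by full key
-- equality, so A's returned value does not depend on the hash function. The port uses a
-- concrete string hash for the bucket choice; this is exact for the function's output.
def pvHashA (cs : List Char) : Nat := cs.foldl (fun a c => a * 31 + c.toNat) 0

-- Dict.insert: self.table[self.hash_mod(key)].append([key, value])
def pvInsertA (m : Nat) (tbl : List (List (List Char × Int))) (key : List Char) (v : Int) :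
    List (List (List Char × Int)) :=
  tbl.set (pvHashA key % m) (tbl.getD (pvHashA key % m) [] ++ [(key, v)])

-- Dict.find: scan bucket self.hash_mod(key), append the value of every entry whose key matches
def pvFindA (m : Nat) (tbl : List (List (List Char × Int))) (key : List Char) : List Int :=
  (tbl.getD (pvHashA key % m) []).foldl
    (fun acc q => if q.1 == key then acc ++ [q.2] else acc) []

def suffix_prefix_overlap_hash1 (lst : List String) (k : Int) : List (Int × Int) :=
  let m := k.toNat
  let tbl := (PySem.List.enumerate lst 0).foldl
      (fun t p => pvInsertA m t (PySem.List.slice p.2.toList (some (-k)) none) p.1)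
      (List.replicate m [])
  (PySem.List.enumerate lst 0).foldl
      (fun acc p =>
        (pvFindA m tbl (PySem.List.slice p.2.toList none (some k))).foldl
          (fun acc2 place => if place != p.1 then acc2 ++ [(place, p.1)] else acc2) acc)
      []

-- ===== PORT B =====
-- one nested comprehension: for i,s in enumerate(lst) for j,t in enumerate(lst)
-- if j != i and t[-k:] == s[:k], emit (j, i)
def suffix_prefix_overlap_hash1_alt (lst : List String) (k : Int) : List (Int × Int) :=
  (PySem.List.enumerate lst 0).flatMap (fun p =>
    ((PySem.List.enumerate lst 0).filter (fun q =>
        q.1 != p.1 &&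
        PySem.List.slice q.2.toList (some (-k)) none == PySem.List.slice p.2.toList none (some k))).map
      (fun q => (q.1, p.1)))

-- ===== PRECONDITION & SPEC =====
-- A raises on every non-empty lst with k ≤ 0 (ZeroDivisionError for k = 0, IndexError for
-- k < 0, from hash_mod / bucket indexing); exactly those inputs are excluded. On empty lst
-- A returns [] for every k.
def Pre_suffix_prefix_overlap_hash1 (lst : List String) (k : Int) : Prop :=
  lst = [] ∨ 1 ≤ k
instance (lst : List String) (k : Int) : Decidable (Pre_suffix_prefix_overlap_hash1 lst k) := by
  unfold Pre_suffix_prefix_overlap_hash1; infer_instance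

def pvWitness_suffix_prefix_overlap_hash1 : List String × Int := (["ab", "ba"], 1)

def Spec_suffix_prefix_overlap_hash1 (lst : List String) (k : Int) (out : List (Int × Int)) : Prop := out = suffix_prefix_overlap_hash1_alt lst k
instance (lst : List String) (k : Int) (out : List (Int × Int)) : Decidable (Spec_suffix_prefix_overlap_hash1 lst k out) := by unfold Spec_suffix_prefix_overlap_hash1; infer_instance

-- ===== CLAIM (what is proved, stated in full; the proofs are below) =====
def Claim_equal_suffix_prefix_overlap_hash1 : Prop := ∀ (lst : List String) (k : Int), Dom_suffix_prefix_overlap_hash1 lst k → Pre_suffix_prefix_overlap_hash1 lst k → Spec_suffix_prefix_overlap_hash1 lst k (suffix_prefix_overlap_hash1 lst k)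

-- ===== LEMMAS AND PROOFS =====

-- reading / writing one bucket of the table
theorem pv_getD_set (tbl : List (List (List Char × Int))) (j i : Nat) (x : List (List Char × Int)) :
    (tbl.set j x).getD i [] = if i = j ∧ j < tbl.length then x else tbl.getD i [] := by
  simp only [List.getD_eq_getElem?_getD, List.getElem?_set]
  by_cases h : j = i
  · subst h
    by_cases hl : j < tbl.length <;> simp [hl]
  · simp [h]
    exact fun hij _ => absurd hij.symm h

theorem pv_getD_replicate (m i : Nat) :
    (List.replicate m ([] : List (List Char × Int))).getD i [] = [] := by
  simp [List.getD_eq_getElem?_getD, List.getElem?_replicate]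
  split <;> simp

-- find is the filter of the bucket by key, projected to the values
theorem pv_findA_eq (m : Nat) (tbl : List (List (List Char × Int))) (key : List Char) :
    pvFindA m tbl key
      = ((tbl.getD (pvHashA key % m) []).filter (fun q => q.1 == key)).map (·.2) := by
  unfold pvFindA
  rw [PySem.List.foldl_append_if]
  simp

-- one insert adds v to find's answer exactly when the keys match
theorem pv_findA_insert (m : Nat) (hm : 0 < m) (tbl : List (List (List Char × Int)))
    (hlen : tbl.length = m) (key' : List Char) (v : Int) (key : List Char) :
    pvFindA m (pvInsertA m tbl key' v) key
      = pvFindA m tbl key ++ (if key' == key then [v] else []) := by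
  rw [pv_findA_eq, pv_findA_eq]
  unfold pvInsertA
  rw [pv_getD_set]
  by_cases hk : key' = key
  · subst hk
    simp [hlen, Nat.mod_lt _ hm]
  · by_cases hi : pvHashA key % m = pvHashA key' % m
    · simp [hi, hlen, Nat.mod_lt _ hm, List.filter_append, hk]
    · simp [hi, hk]

theorem pv_length_insertA (m : Nat) (tbl : List (List (List Char × Int))) (key : List Char) (v : Int) :
    (pvInsertA m tbl key v).length = tbl.length := List.length_set ..

-- after a whole insert loop, find returns the values of the matching keys, in insertion order
theorem pv_findA_foldl (m : Nat) (hm : 0 < m) (l : List (List Char × Int))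
    (tbl : List (List (List Char × Int))) (hlen : tbl.length = m) (key : List Char) :
    pvFindA m (l.foldl (fun t q => pvInsertA m t q.1 q.2) tbl) key
      = pvFindA m tbl key ++ (l.filter (fun q => q.1 == key)).map (·.2) := by
  induction l generalizing tbl with
  | nil => simp
  | cons q l ih =>
    simp only [List.foldl_cons]
    rw [ih _ (by rw [pv_length_insertA]; exact hlen), pv_findA_insert m hm tbl hlen]
    by_cases hq : q.1 = key <;> simp [hq]

-- ===== VERDICT (by name: the statement is the Claim_ definition above) =====
theorem suffix_prefix_overlap_hash1_spec : Claim_equal_suffix_prefix_overlap_hash1 := by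
  intro lst k _ hpre
  unfold Spec_suffix_prefix_overlap_hash1
  rcases hpre with rfl | hk
  · rfl
  · have hm : 0 < k.toNat := by omega
    simp only [suffix_prefix_overlap_hash1, suffix_prefix_overlap_hash1_alt]
    -- what A's filled table answers for any key
    have hlookup : ∀ key : List Char,
        pvFindA k.toNat
          ((PySem.List.enumerate lst 0).foldl
            (fun t p => pvInsertA k.toNat t (PySem.List.slice p.2.toList (some (-k)) none) p.1)
            (List.replicate k.toNat [])) key
        = ((PySem.List.enumerate lst 0).filter
            (fun q => PySem.List.slice q.2.toList (some (-k)) none == key)).map (·.1) := by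
      intro key
      have h1 : (List.foldl (fun t p => pvInsertA k.toNat t (PySem.List.slice p.2.toList (some (-k)) none) p.1) (List.replicate k.toNat []) (PySem.List.enumerate lst 0))
          = List.foldl (fun t q => pvInsertA k.toNat t q.1 q.2) (List.replicate k.toNat [])
              ((PySem.List.enumerate lst 0).map (fun p => (PySem.List.slice p.2.toList (some (-k)) none, p.1))) :=
        (List.foldl_map (f := fun p : Int × String => (PySem.List.slice p.2.toList (some (-k)) none, p.1))
          (g := fun t q => pvInsertA k.toNat t q.1 q.2)).symm
      rw [h1, pv_findA_foldl k.toNat hm _ _ (by simp), pv_findA_eq, pv_getD_replicate,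
        List.filter_map, List.map_map]
      simp [Function.comp_def]
    simp only [PySem.List.foldl_append_if, hlookup]
    rw [PySem.List.foldl_append_eq_flatMap]
    simp only [List.nil_append]
    refine List.flatMap_congr ?_
    intro p _
    rw [List.filter_map, List.map_map, List.filter_filter]
    simp [Function.comp_def]
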